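-- pv_equiv track=rewrite | github.com/dawc17/John-Flavortown | bot/cogs/profile.py | _flavor_rank
-- ===== SOURCE A (Python) =====
-- def _flavor_rank(cookies: int, devlog_seconds_total: int) -> tuple[str, int, int]:
--     score = max(0, cookies) + max(0, devlog_seconds_total // 3600)
--     tiers = [
--         (0, "Street Taco"),
--         (25, "Food Truck"),
--         (75, "Flame Griller"),
--         (150, "Sauce Boss"),
--         (300, "Mayor of Flavortown"),
--     ]
--     current = tiers[0]
--     next_tier = None
--     for i, tier in enumerate(tiers):
--         if score >= tier[0]:
--             current = tier
--             next_tier = tiers[i + 1] if i + 1 < len(tiers) else None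
--     return current[1], score, (next_tier[0] if next_tier else current[0])
-- ===== SOURCE B (Python) =====
-- _THRESHOLDS = [0, 25, 75, 150, 300]
-- _NAMES = ["Street Taco", "Food Truck", "Flame Griller", "Sauce Boss", "Mayor of Flavortown"]
--
--
-- def _flavor_rank(cookies: int, devlog_seconds_total: int) -> tuple[str, int, int]:
--     score = max(0, cookies) + max(0, devlog_seconds_total // 3600)
--     # bisect_right by hand: first index with _THRESHOLDS[idx] > score
--     lo, hi = 0, len(_THRESHOLDS)
--     while lo < hi:
--         mid = (lo + hi) // 2
--         if score < _THRESHOLDS[mid]: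
--             hi = mid
--         else:
--             lo = mid + 1
--     i = lo - 1  # score >= 0 == _THRESHOLDS[0], so lo >= 1
--     nxt = _THRESHOLDS[lo] if lo < len(_THRESHOLDS) else _THRESHOLDS[i]
--     return _NAMES[i], score, nxt
-- ===== Notes on version B (the rewrite author's own statement) =====
-- stated objective: idiomatic
-- what changed: Replaces the accumulating forward scan over (threshold,name) tuples by a binary search (hand-written bisect_right) over a parallel thresholds list, indexing into a names list.
import Mathlib
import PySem

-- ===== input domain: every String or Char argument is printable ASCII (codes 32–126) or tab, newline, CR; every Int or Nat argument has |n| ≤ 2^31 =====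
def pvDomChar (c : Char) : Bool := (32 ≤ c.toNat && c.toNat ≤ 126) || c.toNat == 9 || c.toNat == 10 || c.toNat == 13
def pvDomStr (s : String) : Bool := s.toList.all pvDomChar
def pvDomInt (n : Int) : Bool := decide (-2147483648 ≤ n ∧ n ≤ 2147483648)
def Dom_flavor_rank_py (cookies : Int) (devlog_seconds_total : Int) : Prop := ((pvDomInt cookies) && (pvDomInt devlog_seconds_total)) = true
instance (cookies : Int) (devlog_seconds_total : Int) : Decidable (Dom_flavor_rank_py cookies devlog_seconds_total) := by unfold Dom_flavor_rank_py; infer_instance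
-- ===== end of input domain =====

-- B replaces A's accumulating forward scan over (threshold, name) tuples by a
-- hand-written bisect_right binary search over a parallel thresholds list (objective: idiomatic).

-- ===== PORT A =====
def pvTiersA : List (Int × String) :=
  [(0, "Street Taco"), (25, "Food Truck"), (75, "Flame Griller"),
   (150, "Sauce Boss"), (300, "Mayor of Flavortown")]

def flavor_rank_py (cookies : Int) (devlog_seconds_total : Int) : String × Int × Int :=
  let score := max 0 cookies + max 0 (PySem.Int.floordiv devlog_seconds_total 3600)
  let tiers := pvTiersA
  -- current = tiers[0]; next_tier = None; for i, tier in enumerate(tiers): …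
  let st := (PySem.List.enumerate tiers).foldl
    (fun (st : (Int × String) × Option (Int × String)) it =>
      if score ≥ it.2.1 then
        (it.2, if it.1 + 1 < (tiers.length : Int) then PySem.List.pyGet? tiers (it.1 + 1) else none)
      else st)
    ((0, "Street Taco"), none)
  (st.1.2, score, (match st.2 with | some nt => nt.1 | none => st.1.1))

-- ===== PORT B =====
def pvThresholdsB : List Int := [0, 25, 75, 150, 300]
def pvNamesB : List String :=
  ["Street Taco", "Food Truck", "Flame Griller", "Sauce Boss", "Mayor of Flavortown"]

-- while lo < hi: mid = (lo+hi)//2; if score < thresholds[mid]: hi = mid else lo = mid+1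
def pvBisect (score : Int) (lo hi : Nat) : Nat :=
  if lo < hi then
    let mid := (lo + hi) / 2
    if score < pvThresholdsB.getD mid 0 then pvBisect score lo mid
    else pvBisect score (mid + 1) hi
  else lo
termination_by hi - lo
decreasing_by all_goals omega

def flavor_rank_py_alt (cookies : Int) (devlog_seconds_total : Int) : String × Int × Int :=
  let score := max 0 cookies + max 0 (PySem.Int.floordiv devlog_seconds_total 3600)
  let lo := pvBisect score 0 pvThresholdsB.length
  let i := lo - 1
  let nxt := if lo < pvThresholdsB.length then pvThresholdsB.getD lo 0 else pvThresholdsB.getD i 0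
  (pvNamesB.getD i "", score, nxt)

-- ===== PRECONDITION & SPEC =====
def Spec_flavor_rank_py (cookies : Int) (devlog_seconds_total : Int) (out : String × Int × Int) : Prop := out = flavor_rank_py_alt cookies devlog_seconds_total
instance (cookies : Int) (devlog_seconds_total : Int) (out : String × Int × Int) : Decidable (Spec_flavor_rank_py cookies devlog_seconds_total out) := by unfold Spec_flavor_rank_py; infer_instance

-- ===== CLAIM (what is proved, stated in full; the proofs are below) =====
def Claim_equal_flavor_rank_py : Prop := ∀ (cookies : Int) (devlog_seconds_total : Int), Dom_flavor_rank_py cookies devlog_seconds_total → Spec_flavor_rank_py cookies devlog_seconds_total (flavor_rank_py cookies devlog_seconds_total)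

-- ===== LEMMAS AND PROOFS =====

set_option maxHeartbeats 1000000 in
theorem flavor_rank_core_eq (c d : Int) : flavor_rank_py c d = flavor_rank_py_alt c d := by
  have hs : 0 ≤ max 0 c + max 0 (PySem.Int.floordiv d 3600) :=
    add_nonneg (le_max_left 0 c) (le_max_left 0 _)
  unfold flavor_rank_py flavor_rank_py_alt
  generalize hE : max 0 c + max 0 (PySem.Int.floordiv d 3600) = s at hs ⊢
  clear hE
  rcases lt_or_ge s 25 with h1 | h1
  · simp [pvTiersA, pvThresholdsB, pvNamesB, pvBisect,
      PySem.List.enumerate_cons, PySem.List.enumerate_nil,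
      show s ≥ 0 by omega, show ¬ s ≥ 25 by omega, show ¬ s ≥ 75 by omega,
      show ¬ s ≥ 150 by omega, show ¬ s ≥ 300 by omega,
      show ¬ s < 0 by omega, show s < 25 by omega, show s < 75 by omega]
  · rcases lt_or_ge s 75 with h2 | h2
    · simp [pvTiersA, pvThresholdsB, pvNamesB, pvBisect,
        PySem.List.enumerate_cons, PySem.List.enumerate_nil,
        show s ≥ 0 by omega, show s ≥ 25 by omega, show ¬ s ≥ 75 by omega,
        show ¬ s ≥ 150 by omega, show ¬ s ≥ 300 by omega,
        show ¬ s < 25 by omega, show s < 75 by omega]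
    · rcases lt_or_ge s 150 with h3 | h3
      · simp [pvTiersA, pvThresholdsB, pvNamesB, pvBisect,
          PySem.List.enumerate_cons, PySem.List.enumerate_nil,
          show s ≥ 0 by omega, show s ≥ 25 by omega, show s ≥ 75 by omega,
          show ¬ s ≥ 150 by omega, show ¬ s ≥ 300 by omega,
          show ¬ s < 75 by omega, show s < 150 by omega, show s < 300 by omega]
      · rcases lt_or_ge s 300 with h4 | h4
        · simp [pvTiersA, pvThresholdsB, pvNamesB, pvBisect,
            PySem.List.enumerate_cons, PySem.List.enumerate_nil,
            show s ≥ 0 by omega, show s ≥ 25 by omega, show s ≥ 75 by omega,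
            show s ≥ 150 by omega, show ¬ s ≥ 300 by omega,
            show ¬ s < 75 by omega, show ¬ s < 150 by omega, show s < 300 by omega]
        · simp [pvTiersA, pvThresholdsB, pvNamesB, pvBisect,
            PySem.List.enumerate_cons, PySem.List.enumerate_nil,
            show s ≥ 0 by omega, show s ≥ 25 by omega, show s ≥ 75 by omega,
            show s ≥ 150 by omega, show s ≥ 300 by omega,
            show ¬ s < 75 by omega, show ¬ s < 150 by omega, show ¬ s < 300 by omega]

-- ===== VERDICT (by name: the statement is the Claim_ definition above) =====
theorem flavor_rank_py_spec : Claim_equal_flavor_rank_py := by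
  intro c d _
  unfold Spec_flavor_rank_py
  exact flavor_rank_core_eq c d
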